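-- pv_equiv track=rewrite | github.com/AlexVBodrov/python_algorithms | ex3.py | calc_median
-- ===== SOURCE A (Python) =====
-- def calc_median(lst):
-- 	l = lst.copy()
-- 	while len(l) > 1:
-- 		max_num = max(l)
-- 		min_num = min(l)
-- 		l.remove(max_num)
-- 		if len(l) == 1:
-- 			return l[0]
-- 		else:
-- 		   l.remove(min_num)
-- 	return l[0]
-- ===== SOURCE B (Python) =====
-- def calc_median(lst):
--     return sorted(lst)[(len(lst) - 1) // 2]
-- ===== Notes on version B (the rewrite author's own statement) =====
-- stated objective: faster
-- what changed: Replaces the quadratic remove-max/remove-min elimination loop by a single sort followed by indexing the lower median at (n-1)//2.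
import Mathlib
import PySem

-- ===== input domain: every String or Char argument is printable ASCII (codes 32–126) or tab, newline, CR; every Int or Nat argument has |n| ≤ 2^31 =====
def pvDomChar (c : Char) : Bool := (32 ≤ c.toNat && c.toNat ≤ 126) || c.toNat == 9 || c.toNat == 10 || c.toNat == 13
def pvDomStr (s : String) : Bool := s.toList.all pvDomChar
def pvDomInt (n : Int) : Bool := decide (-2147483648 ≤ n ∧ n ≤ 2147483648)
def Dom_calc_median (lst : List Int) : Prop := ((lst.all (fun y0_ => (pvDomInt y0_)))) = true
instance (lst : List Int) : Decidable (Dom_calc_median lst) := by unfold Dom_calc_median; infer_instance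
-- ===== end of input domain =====

-- B replaces A's quadratic remove-max/remove-min elimination loop by one sort plus
-- indexing the lower median at (n-1)//2 (objective: faster).

-- ===== PORT A =====
-- termination helper for the while loop (removing an element shrinks the list); cited in decreasing_by
theorem pvRemoveGetDLen {α : Type} [BEq α] [LawfulBEq α] (xs : List α) (v : α) :
    ((PySem.List.remove? xs v).getD []).length ≤ xs.length - 1 := by
  cases h : PySem.List.remove? xs v with
  | none => simp
  | some r =>
    have hv : v ∈ xs := by
      by_contra hv
      rw [(PySem.List.remove?_eq_none_iff xs v).mpr hv] at h
      simp at h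
    have h2 := PySem.List.remove?_eq_some_erase (xs := xs) (v := v) hv
    rw [h] at h2
    cases h2
    simp [List.length_erase_of_mem hv]

-- while len(l) > 1: max_num = max(l); min_num = min(l); l.remove(max_num);
--   if len(l) == 1: return l[0] else l.remove(min_num);   finally return l[0]
def calcLoop (l : List Int) : Int :=
  if _h : 1 < l.length then
    let max_num := (PySem.List.max? l (fun x => x)).getD 0
    let min_num := (PySem.List.min? l (fun x => x)).getD 0
    let l1 := (PySem.List.remove? l max_num).getD []
    if l1.length = 1 then (PySem.List.pyGet? l1 0).getD 0
    else calcLoop ((PySem.List.remove? l1 min_num).getD [])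
  else (PySem.List.pyGet? l 0).getD 0
termination_by l.length
decreasing_by
  have h1 := pvRemoveGetDLen l ((PySem.List.max? l (fun x => x)).getD 0)
  have h2 := pvRemoveGetDLen ((PySem.List.remove? l ((PySem.List.max? l (fun x => x)).getD 0)).getD [])
      ((PySem.List.min? l (fun x => x)).getD 0)
  omega

def calc_median (lst : List Int) : Int := calcLoop lst

-- ===== PORT B =====
-- return sorted(lst)[(len(lst) - 1) // 2]
def calc_median_alt (lst : List Int) : Int :=
  (PySem.List.pyGet? (PySem.List.sorted lst (fun x => x) false)
    (PySem.Int.floordiv ((lst.length : Int) - 1) 2)).getD 0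

-- ===== PRECONDITION & SPEC =====
-- A raises IndexError on the empty list (l[0] on []); B raises IndexError there too.
def Pre_calc_median (lst : List Int) : Prop := lst ≠ []
instance (lst : List Int) : Decidable (Pre_calc_median lst) := by unfold Pre_calc_median; infer_instance

def pvWitness_calc_median : List Int := ([3, 1, 2] : List Int)

def Spec_calc_median (lst : List Int) (out : Int) : Prop := out = calc_median_alt lst
instance (lst : List Int) (out : Int) : Decidable (Spec_calc_median lst out) := by unfold Spec_calc_median; infer_instance

-- ===== CLAIM (what is proved, stated in full; the proofs are below) =====
def Claim_equal_calc_median : Prop := ∀ (lst : List Int), Dom_calc_median lst → Pre_calc_median lst → Spec_calc_median lst (calc_median lst)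

-- ===== LEMMAS AND PROOFS =====

theorem pvLast (s : List Int) (hp : s.Pairwise (· ≤ ·)) (m : Int) (hm : m ∈ s)
    (hmax : ∀ y ∈ s, y ≤ m) (hs : s ≠ []) : s.getLast hs = m := by
  have hd := List.dropLast_append_getLast hs
  have hlast_mem : s.getLast hs ∈ s := List.getLast_mem hs
  rcases (List.mem_append.mp (by rw [hd]; exact hm)) with h | h
  · have hpair := hp
    rw [← hd] at hpair
    have := (List.pairwise_append.mp hpair).2.2 m h (s.getLast hs) (by simp)
    exact le_antisymm (hmax _ hlast_mem) this
  · have : m = s.getLast hs := by simpa using h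
    exact this.symm


theorem pvHead (s : List Int) (hp : s.Pairwise (· ≤ ·)) (m : Int) (hm : m ∈ s)
    (hmin : ∀ y ∈ s, m ≤ y) (hs : s ≠ []) : s.head hs = m := by
  cases s with
  | nil => exact absurd rfl hs
  | cons a t =>
    simp only [List.head_cons]
    rcases List.mem_cons.mp hm with h | hmt
    · exact h.symm
    · exact le_antisymm ((List.pairwise_cons.mp hp).1 m hmt) (hmin a (by simp))


theorem pvSortedEraseMax (l : List Int) (m : Int) (hm : m ∈ l) (hmax : ∀ y ∈ l, y ≤ m)
    (hne : l ≠ []) :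
    PySem.List.sorted (l.erase m) (fun x => x) false
      = (PySem.List.sorted l (fun x => x) false).dropLast := by
  set s := PySem.List.sorted l (fun x => x) false with hs
  have hperm : s.Perm l := PySem.List.sorted_perm ..
  have hpair : s.Pairwise (· ≤ ·) := PySem.List.sorted_pairwise ..
  have hsne : s ≠ [] := by
    intro h
    exact hne (by rwa [hs, PySem.List.sorted_eq_nil_iff] at h)
  have hms : m ∈ s := hperm.mem_iff.mpr hm
  have hlast : s.getLast hsne = m :=
    pvLast s hpair m hms (fun y hy => hmax y (hperm.subset hy)) hsne
  have hd : s.dropLast ++ [m] = s := by rw [← hlast]; exact List.dropLast_append_getLast hsne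
  have h1 : (l.erase m).Perm (s.erase m) := (hperm.erase m).symm
  have h2 : s.Perm (m :: s.erase m) := List.perm_cons_erase hms
  have h3 := List.perm_append_singleton m s.dropLast
  rw [hd] at h3
  have h4 : (s.dropLast).Perm (l.erase m) :=
    ((h3.symm.trans h2).cons_inv).trans h1.symm
  exact PySem.List.sorted_id_eq_of_perm_of_pairwise _ _ h4
    (hpair.sublist (List.dropLast_sublist s))


theorem pvMain : ∀ (n : Nat) (l : List Int), l.length = n → l ≠ [] →
    calcLoop l = calc_median_alt l := by
  intro n
  induction n using Nat.strong_induction_on with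
  | _ n ih =>
  intro l hlen hne
  set s := PySem.List.sorted l (fun x => x) false with hsdef
  have hperm : s.Perm l := PySem.List.sorted_perm ..
  have hpair : s.Pairwise (· ≤ ·) := PySem.List.sorted_pairwise ..
  have hslen : s.length = l.length := PySem.List.length_sorted ..
  rw [calcLoop]
  by_cases h1 : 1 < l.length
  · rw [dif_pos h1]
    -- max and min exist
    cases hmx : PySem.List.max? l (fun x => x) with
    | none => exact absurd ((PySem.List.max?_eq_none_iff l _).mp hmx) hne
    | some m =>
    cases hmn : PySem.List.min? l (fun x => x) with
    | none => exact absurd ((PySem.List.min?_eq_none_iff l _).mp hmn) hne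
    | some mn =>
    have hm_mem : m ∈ l := PySem.List.max?_mem hmx
    have hmax : ∀ y ∈ l, y ≤ m := fun y hy => PySem.List.max?_isMax hmx y hy
    have hmn_mem : mn ∈ l := PySem.List.min?_mem hmn
    have hmin : ∀ y ∈ l, mn ≤ y := fun y hy => PySem.List.min?_isMin hmn y hy
    have hrem1 : PySem.List.remove? l m = some (l.erase m) :=
      PySem.List.remove?_eq_some_erase l m hm_mem
    have hl1len : (l.erase m).length = l.length - 1 := List.length_erase_of_mem hm_mem
    have hsort1 : PySem.List.sorted (l.erase m) (fun x => x) false = s.dropLast :=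
      pvSortedEraseMax l m hm_mem hmax hne
    simp only [hrem1, Option.getD_some]
    by_cases h2 : (l.erase m).length = 1
    · rw [if_pos h2]
      -- l.length = 2; l.erase m is the singleton [s[0]]
      have hn2 : l.length = 2 := by omega
      obtain ⟨x, hx⟩ := List.length_eq_one_iff.mp h2
      have hx' : s.dropLast = [x] := by
        rw [← hsort1, hx]
        exact PySem.List.sorted_eq_self_of_pairwise [x] _ (List.pairwise_singleton _ _)
      have hidx : PySem.Int.floordiv ((l.length : Int) - 1) 2 = 0 := by
        rw [hn2]; decide
      have hs0 : s[0]? = some x := by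
        have : s = x :: [s.getLast (by intro h; simp [h] at hslen; omega)] := by
          conv_lhs => rw [← List.dropLast_append_getLast (l := s) (by intro h; simp [h] at hslen; omega)]
          rw [hx']; rfl
        rw [this]; rfl
      rw [hx]
      unfold calc_median_alt
      rw [← hsdef, hidx]
      have : PySem.List.pyGet? s 0 = s[0]? := by
        have := PySem.List.pyGet?_natCast s 0
        simpa using this
      rw [this, hs0]
      rfl
    · rw [if_neg h2]
      -- l.length ≥ 3
      have hn3 : 3 ≤ l.length := by omega
      -- head of s is mn
      have hsne : s ≠ [] := by intro h; simp [h] at hslen; omega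
      have hhead : s.head hsne = mn :=
        pvHead s hpair mn (hperm.mem_iff.mpr hmn_mem)
          (fun y hy => hmin y (hperm.subset hy)) hsne
      -- decompose s = mn :: tail
      obtain ⟨a, t, hst⟩ := List.exists_cons_of_ne_nil hsne
      have ha : a = mn := by simp only [hst, List.head_cons] at hhead; exact hhead
      subst ha
      have htlen : t.length = l.length - 1 := by rw [hst] at hslen; simp at hslen; omega
      have htne : t ≠ [] := by intro h; rw [h] at htlen; simp at htlen; omega
      have hdl : s.dropLast = a :: t.dropLast := by
        rw [hst, List.dropLast_cons_of_ne_nil htne]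
      -- mn ∈ l.erase m
      have hmn1 : a ∈ l.erase m := by
        rw [← PySem.List.mem_sorted (l.erase m) (fun x => x) false, hsort1, hdl]
        simp
      have hrem2 : PySem.List.remove? (l.erase m) a = some ((l.erase m).erase a) :=
        PySem.List.remove?_eq_some_erase _ _ hmn1
      rw [hrem2, Option.getD_some]
      -- sorted of l2 is t.dropLast
      have hperm1 : (l.erase m).Perm (a :: t.dropLast) := by
        rw [← hdl, ← hsort1]; exact (PySem.List.sorted_perm ..).symm
      have hperm2 : ((l.erase m).erase a).Perm (t.dropLast) := by
        have := hperm1.erase a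
        rwa [List.erase_cons_head] at this
      have hpairt : (t.dropLast).Pairwise (· ≤ ·) := by
        have : (t.dropLast).Sublist s := by
          rw [hst]
          exact ((List.dropLast_sublist t).trans (List.sublist_cons_self a t))
        exact hpair.sublist this
      have hsort2 : PySem.List.sorted ((l.erase m).erase a) (fun x => x) false = t.dropLast :=
        PySem.List.sorted_id_eq_of_perm_of_pairwise _ _ hperm2.symm hpairt
      have hl2len : ((l.erase m).erase a).length = l.length - 2 := by
        rw [List.length_erase_of_mem hmn1]; omega
      have hl2ne : (l.erase m).erase a ≠ [] := by
        intro h; rw [h] at hl2len; simp at hl2len; omega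
      -- apply IH
      rw [ih (l.length - 2) (by omega) _ hl2len hl2ne]
      -- now both sides are calc_median_alt; compare indices
      unfold calc_median_alt
      rw [hsort2, ← hsdef, hl2len]
      -- index arithmetic
      have hidx2 : PySem.Int.floordiv (((l.length - 2 : Nat) : Int) - 1) 2
          = (((l.length - 3) / 2 : Nat) : Int) := by
        rw [show (((l.length - 2 : Nat) : Int) - 1) = ((l.length - 3 : Nat) : Int) by omega]
        exact_mod_cast PySem.Int.floordiv_natCast (l.length - 3) 2
      have hidx1 : PySem.Int.floordiv (((l.length : Nat) : Int) - 1) 2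
          = (((l.length - 1) / 2 : Nat) : Int) := by
        rw [show (((l.length : Nat) : Int) - 1) = ((l.length - 1 : Nat) : Int) by omega]
        exact_mod_cast PySem.Int.floordiv_natCast (l.length - 1) 2
      rw [hidx2, hidx1, PySem.List.pyGet?_natCast, PySem.List.pyGet?_natCast]
      -- t.dropLast[(n-3)/2]? = s[(n-1)/2]?
      have hk : (l.length - 1) / 2 = (l.length - 3) / 2 + 1 := by omega
      have hdllen : t.dropLast.length = l.length - 2 := by simp [htlen]; omega
      have hklt : (l.length - 3) / 2 < t.dropLast.length := by omega
      rw [hk, hst]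
      rw [List.getElem?_cons_succ]
      rw [List.getElem?_eq_getElem hklt, List.getElem?_eq_getElem (by omega : (l.length-3)/2 < t.length)]
      simp [List.getElem_dropLast]
  · rw [dif_neg h1]
    -- l is a singleton
    have : l.length = 1 := by
      cases l with
      | nil => exact absurd rfl hne
      | cons a t => simp at h1 ⊢; omega
    obtain ⟨x, hx⟩ := List.length_eq_one_iff.mp this
    subst hx
    unfold calc_median_alt
    rw [← hsdef]
    have hsx : s = [x] := by
      rw [hsdef]
      exact PySem.List.sorted_eq_self_of_pairwise [x] _ (List.pairwise_singleton _ _)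
    rw [hsx]
    simp

-- ===== VERDICT (by name: the statement is the Claim_ definition above) =====
theorem calc_median_spec : Claim_equal_calc_median := by
  intro lst _ hpre
  unfold Spec_calc_median calc_median
  exact pvMain lst.length lst rfl hpre
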